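-- pv_equiv track=rewrite | github.com/Jafar1959/SCDAT_PROJECT_2026 | scdat_utils_26.py | month_circular_array
-- ===== SOURCE A (Python) =====
-- def month_circular_array(start_month, total_month):
--     assert start_month > 0
--     assert start_month < 13
--
--     months = [0] * total_month
--     start_month -= 1
--
--     for i in range(total_month):
--         months[i] = (start_month % 12) + 1
--         start_month += 1
--
--     return months
-- ===== SOURCE B (Python) =====
-- def month_circular_array(start_month, total_month):
--     assert start_month > 0
--     assert start_month < 13
--     base = [(start_month - 1 + i) % 12 + 1 for i in range(12)]
--     reps = (total_month + 11) // 12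
--     return (base * reps)[:total_month]
-- ===== Notes on version B (the rewrite author's own statement) =====
-- stated objective: idiomatic
-- what changed: Replaces the per-element loop that mutates a running counter and a preallocated list with a period-then-tile strategy: build the 12-month base cycle once, tile it ceil(total_month/12) times and slice to length.
import Mathlib
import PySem

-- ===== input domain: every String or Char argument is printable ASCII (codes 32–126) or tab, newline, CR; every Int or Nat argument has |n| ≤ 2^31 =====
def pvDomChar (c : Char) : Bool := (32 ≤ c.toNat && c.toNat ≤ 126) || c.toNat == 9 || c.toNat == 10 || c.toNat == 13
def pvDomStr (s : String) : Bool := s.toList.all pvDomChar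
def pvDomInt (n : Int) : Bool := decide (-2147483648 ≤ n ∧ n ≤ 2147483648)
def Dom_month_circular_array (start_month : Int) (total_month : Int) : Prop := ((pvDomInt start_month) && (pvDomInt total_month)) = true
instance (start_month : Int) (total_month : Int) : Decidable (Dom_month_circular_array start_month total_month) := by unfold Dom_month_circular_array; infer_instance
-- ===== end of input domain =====

-- B builds the 12-month base cycle once, tiles it ceil(total/12) times and slices, instead of
-- A's per-element loop over a mutated counter; same values everywhere A returns (idiomatic, not faster).

-- ===== PORT A =====
-- months = [0]*total_month; start_month -= 1; for i in range(total_month): months[i] = (start_month % 12)+1; start_month += 1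
def month_circular_array (start_month : Int) (total_month : Int) : List Int :=
  let months : List Int := List.replicate total_month.toNat 0
  let sm := start_month - 1
  let r := (PySem.List.pyRange 0 total_month 1).foldl
    (fun (st : List Int × Int) i => (st.1.set i.toNat (PySem.Int.mod st.2 12 + 1), st.2 + 1))
    (months, sm)
  r.1

-- ===== PORT B =====
-- base = [(start_month-1+i) % 12 + 1 for i in range(12)]; reps = (total_month+11)//12; return (base*reps)[:total_month]
def month_circular_array_alt (start_month : Int) (total_month : Int) : List Int :=
  let base := (PySem.List.pyRange 0 12 1).map (fun i => PySem.Int.mod (start_month - 1 + i) 12 + 1)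
  let reps := PySem.Int.floordiv (total_month + 11) 12
  PySem.List.slice (List.flatten (List.replicate reps.toNat base)) none (some total_month)

-- ===== PRECONDITION & SPEC =====
-- Pre_ excludes exactly the inputs on which A's asserts raise AssertionError (start_month outside 1..12).
def Pre_month_circular_array (start_month : Int) (total_month : Int) : Prop :=
  0 < start_month ∧ start_month < 13
instance (start_month : Int) (total_month : Int) : Decidable (Pre_month_circular_array start_month total_month) := by unfold Pre_month_circular_array; infer_instance
def pvWitness_month_circular_array : Int × Int := (11, 5)

def Spec_month_circular_array (start_month : Int) (total_month : Int) (out : List Int) : Prop := out = month_circular_array_alt start_month total_month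
instance (start_month : Int) (total_month : Int) (out : List Int) : Decidable (Spec_month_circular_array start_month total_month out) := by unfold Spec_month_circular_array; infer_instance

-- ===== CLAIM (what is proved, stated in full; the proofs are below) =====
def Claim_equal_month_circular_array : Prop := ∀ (start_month : Int) (total_month : Int), Dom_month_circular_array start_month total_month → Pre_month_circular_array start_month total_month → Spec_month_circular_array start_month total_month (month_circular_array start_month total_month)

-- ===== LEMMAS AND PROOFS =====

-- the common "spine": index i gets (s-1+i) % 12 + 1
def pvSpine (s : Int) (n : Nat) : List Int :=
  (List.range n).map (fun (k : Nat) => PySem.Int.mod (s - 1 + (k : Int)) 12 + 1)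

-- A's loop over range n, with the tail beyond the written prefix generalized
lemma pvLoopA (s : Int) (n : Nat) (tail : List Int) :
    ((List.range n).foldl
      (fun (st : List Int × Int) (k : Nat) => (st.1.set k (PySem.Int.mod st.2 12 + 1), st.2 + 1))
      (List.replicate n (0 : Int) ++ tail, s - 1))
    = (pvSpine s n ++ tail, s - 1 + n) := by
  induction n generalizing tail with
  | zero => simp [pvSpine]
  | succ m ih =>
    have hrep : List.replicate (m + 1) (0 : Int) ++ tail
        = List.replicate m (0 : Int) ++ ((0 : Int) :: tail) := by
      simp [List.replicate_succ']
    rw [List.range_succ, List.foldl_append, hrep, ih]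
    simp only [List.foldl_cons, List.foldl_nil]
    have hset : (pvSpine s m ++ (0 : Int) :: tail).set m (PySem.Int.mod (s - 1 + (m : Int)) 12 + 1)
        = pvSpine s (m + 1) ++ tail := by
      have hlen : (pvSpine s m).length = m := by simp [pvSpine]
      rw [List.set_append_right _ _ (by omega)]
      simp [pvSpine, List.range_succ]
    rw [hset]
    congr 1
    push_cast
    ring

lemma pvA_eq_spine (s t : Int) :
    month_circular_array s t = pvSpine s t.toNat := by
  simp only [month_circular_array]
  rw [PySem.List.pyRange_one, List.foldl_map]
  have hfun : (fun (st : List Int × Int) (k : Nat) =>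
        (st.1.set ((0 : Int) + (k : Int)).toNat (PySem.Int.mod st.2 12 + 1), st.2 + 1))
      = (fun (st : List Int × Int) (k : Nat) =>
        (st.1.set k (PySem.Int.mod st.2 12 + 1), st.2 + 1)) := by
    funext st k
    simp
  rw [hfun]
  have h := pvLoopA s t.toNat []
  simp only [List.append_nil] at h
  simp only [sub_zero]
  rw [h]

-- the 12-long base list is the spine of length 12
lemma pvBase (s : Int) :
    (PySem.List.pyRange 0 12 1).map (fun i => PySem.Int.mod (s - 1 + i) 12 + 1)
    = pvSpine s 12 := by
  rw [PySem.List.pyRange_one, List.map_map]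
  unfold pvSpine
  refine List.map_congr_left ?_
  intro k _
  simp

-- tiling the base R times is the spine of length 12*R (the % 12 makes the spine 12-periodic)
lemma pvTile (s : Int) (R : Nat) :
    (List.replicate R (pvSpine s 12)).flatten = pvSpine s (12 * R) := by
  induction R with
  | zero => simp [pvSpine]
  | succ m ih =>
    rw [List.replicate_succ, List.flatten_cons, ih]
    unfold pvSpine
    rw [show 12 * (m + 1) = 12 + 12 * m by ring, List.range_add, List.map_append]
    congr 1
    rw [List.map_map]
    refine List.map_congr_left ?_
    intro k _
    simp only [Function.comp_apply]
    rw [PySem.Int.mod_eq_emod_of_pos (by norm_num), PySem.Int.mod_eq_emod_of_pos (by norm_num)]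
    push_cast
    omega

lemma pvB_eq_spine (s t : Int) :
    month_circular_array_alt s t = pvSpine s t.toNat := by
  simp only [month_circular_array_alt]
  rw [pvBase, pvTile]
  by_cases ht : 0 ≤ t
  · rw [PySem.List.slice_to _ ht]
    have hle : t.toNat ≤ 12 * (PySem.Int.floordiv (t + 11) 12).toNat := by
      have h := PySem.Int.floordiv_eq_ediv_of_pos (a := t + 11) (b := 12) (by norm_num)
      omega
    unfold pvSpine
    rw [← List.map_take, List.take_range, Nat.min_eq_left hle]
  · have hR : (PySem.Int.floordiv (t + 11) 12).toNat = 0 := by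
      have h := PySem.Int.floordiv_eq_ediv_of_pos (a := t + 11) (b := 12) (by norm_num)
      omega
    have ht0 : t.toNat = 0 := by omega
    rw [hR, ht0]
    simp [pvSpine, PySem.List.slice]

-- ===== VERDICT (by name: the statement is the Claim_ definition above) =====
theorem month_circular_array_spec : Claim_equal_month_circular_array := by
  intro s t _ _
  unfold Spec_month_circular_array
  rw [pvA_eq_spine, pvB_eq_spine]
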